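-- pv_equiv track=rewrite | github.com/TomCodesStuff/Advent-Of-Code | 2024/code/day_2.py | evaulate_level
-- ===== SOURCE A (Python) =====
-- def evaulate_level(level, n):
--     # Stores if a pair of numbers are increasing or decreasing
--     nums_increasing = [False for _ in range(n)]
--     # Used to evaluate of each pair of numbers is safe
--     is_level_safe = [False for _ in range(n - 1)]
--     for i in range(n - 1):
--             # Difference between pair of nums
--             diff = level[i] - level[i + 1]
--             # If difference is strictly positive, the pair is increasing
--             if(diff > 0): nums_increasing[i] = True
--             # Check if difference between nums is between 1 - 3 (inclusive)
--             # And if pair of nums is follwing the same pattern as last pair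
--             if((abs(diff) >= 1 and abs(diff) <= 3) and
--             (i == 0 or nums_increasing[i] == nums_increasing[i - 1])):
--                 # Set pair of nums to safe
--                 is_level_safe[i] = True
--     # Return 1 if level is safe, else 0
--     if(all(is_level_safe)): return 1
--     else: return 0
-- ===== SOURCE B (Python) =====
-- def evaulate_level(level, n):
--     diffs = [level[i] - level[i + 1] for i in range(n - 1)]
--     if all(1 <= d <= 3 for d in diffs) or all(-3 <= d <= -1 for d in diffs):
--         return 1
--     return 0
-- ===== Notes on version B (the rewrite author's own statement) =====
-- stated objective: simpler
-- what changed: Replaces A's two mutable boolean arrays and its pair-to-previous-pair direction comparison with a single list of consecutive differences judged by two independent monotone-band all-checks (all diffs in [1,3] or all in [-3,-1]).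
import Mathlib
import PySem

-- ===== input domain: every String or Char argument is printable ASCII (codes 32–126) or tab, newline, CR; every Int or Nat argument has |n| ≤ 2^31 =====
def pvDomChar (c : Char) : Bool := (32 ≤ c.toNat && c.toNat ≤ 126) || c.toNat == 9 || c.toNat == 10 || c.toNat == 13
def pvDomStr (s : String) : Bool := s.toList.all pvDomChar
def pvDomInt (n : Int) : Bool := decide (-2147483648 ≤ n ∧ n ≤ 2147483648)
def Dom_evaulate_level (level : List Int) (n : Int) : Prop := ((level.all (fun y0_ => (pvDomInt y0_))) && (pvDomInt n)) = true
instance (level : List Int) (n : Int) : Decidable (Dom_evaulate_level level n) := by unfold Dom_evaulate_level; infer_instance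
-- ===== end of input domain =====

-- B drops A's two mutable boolean arrays and previous-pair direction bookkeeping for a
-- single diff list judged by two independent band checks; objective: simpler, same O(n) cost.

-- ===== PORT A =====
def evaulate_level (level : List Int) (n : Int) : Int :=
  let nums_increasing : List Bool := (PySem.List.pyRange 0 n 1).map (fun _ => false)
  let is_level_safe : List Bool := (PySem.List.pyRange 0 (n - 1) 1).map (fun _ => false)
  let st := (PySem.List.pyRange 0 (n - 1) 1).foldl
    (fun (st : List Bool × List Bool) i =>
      let diff := PySem.List.pyGetD level i 0 - PySem.List.pyGetD level (i + 1) 0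
      let ni := if 0 < diff then PySem.List.pySetD st.1 i true else st.1
      let ils := if (1 ≤ |diff| ∧ |diff| ≤ 3) ∧
                    (i = 0 ∨ PySem.List.pyGetD ni i false = PySem.List.pyGetD ni (i - 1) false)
                 then PySem.List.pySetD st.2 i true else st.2
      (ni, ils))
    (nums_increasing, is_level_safe)
  if st.2.all (fun b => b) then 1 else 0

-- ===== PORT B =====
def evaulate_level_alt (level : List Int) (n : Int) : Int :=
  let diffs := (PySem.List.pyRange 0 (n - 1) 1).map
    (fun i => PySem.List.pyGetD level i 0 - PySem.List.pyGetD level (i + 1) 0)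
  if diffs.all (fun d => decide (1 ≤ d) && decide (d ≤ 3)) ||
     diffs.all (fun d => decide (-3 ≤ d) && decide (d ≤ -1)) then 1 else 0

-- ===== PRECONDITION & SPEC =====
-- Pre_ excludes exactly the inputs where A raises IndexError: n ≥ 2 with fewer than n levels.
def Pre_evaulate_level (level : List Int) (n : Int) : Prop := 2 ≤ n → n ≤ (level.length : Int)
instance (level : List Int) (n : Int) : Decidable (Pre_evaulate_level level n) := by
  unfold Pre_evaulate_level; infer_instance
def pvWitness_evaulate_level : List Int × Int := ([1, 2, 3], 3)

def Spec_evaulate_level (level : List Int) (n : Int) (out : Int) : Prop := out = evaulate_level_alt level n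
instance (level : List Int) (n : Int) (out : Int) : Decidable (Spec_evaulate_level level n out) := by unfold Spec_evaulate_level; infer_instance

-- ===== CLAIM (what is proved, stated in full; the proofs are below) =====
def Claim_equal_evaulate_level : Prop := ∀ (level : List Int) (n : Int), Dom_evaulate_level level n → Pre_evaulate_level level n → Spec_evaulate_level level n (evaulate_level level n)

-- ===== LEMMAS AND PROOFS =====

def pvDif (level : List Int) (i : Int) : Int :=
  PySem.List.pyGetD level i 0 - PySem.List.pyGetD level (i + 1) 0
def pvNI (level : List Int) (n : Int) (k : Nat) : List Bool :=
  (List.range n.toNat).map (fun j => decide (j < k) && decide (0 < pvDif level j))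
def pvSafe (level : List Int) (j : Nat) : Bool :=
  (decide (1 ≤ |pvDif level j|) && decide (|pvDif level j| ≤ 3)) &&
  (decide (j = 0) || (decide (0 < pvDif level (j : Int)) == decide (0 < pvDif level ((j : Int) - 1))))
def pvILS (level : List Int) (n : Int) (k : Nat) : List Bool :=
  (List.range (n - 1).toNat).map (fun j => decide (j < k) && pvSafe level j)

theorem pvNI_step (level : List Int) (n : Int) (k : Nat) (hk : k < n.toNat) :
    (if 0 < pvDif level (k : Int) then PySem.List.pySetD (pvNI level n k) (k : Int) true
     else pvNI level n k) = pvNI level n (k + 1) := by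
  split_ifs with h
  · simp only [PySem.List.pySetD_natCast]
    apply List.ext_getElem
    · simp [pvNI]
    · intro j hj _
      simp only [pvNI, List.getElem_set, List.getElem_map, List.getElem_range] at *
      by_cases hjk : j = k
      · subst hjk; simp [h]
      · have e1 : decide (k = j) = false := decide_eq_false (by omega)
        have e2 : decide (j < k) = decide (j ≤ k) := decide_eq_decide.mpr (by omega)
        simp [e1, e2]
  · apply List.ext_getElem
    · simp [pvNI]
    · intro j hj _
      simp only [pvNI, List.getElem_map, List.getElem_range] at *
      by_cases hjk : j = k
      · subst hjk; simp [h]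
      · congr 1
        simp only [decide_eq_decide]; omega

theorem pvNI_get (level : List Int) (n : Int) (k j : Nat) (hj : j < n.toNat) (hjk : j < k) :
    PySem.List.pyGetD (pvNI level n k) (j : Int) false = decide (0 < pvDif level j) := by
  rw [PySem.List.pyGetD_natCast]
  rw [List.getD_eq_getElem _ _ (by simp [pvNI]; omega)]
  simp [pvNI, hjk]

theorem pvCond_iff (level : List Int) (n : Int) (k : Nat) (hkn : k < n.toNat) :
    ((1 ≤ |pvDif level (k : Int)| ∧ |pvDif level (k : Int)| ≤ 3) ∧
     ((k : Int) = 0 ∨ PySem.List.pyGetD (pvNI level n (k + 1)) (k : Int) false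
        = PySem.List.pyGetD (pvNI level n (k + 1)) ((k : Int) - 1) false))
    ↔ pvSafe level k = true := by
  rw [pvNI_get level n (k + 1) k hkn (by omega)]
  unfold pvSafe
  by_cases hk0 : k = 0
  · subst hk0; simp
  · have hc : ((k : Int) - 1) = ((k - 1 : Nat) : Int) := by omega
    rw [hc, pvNI_get level n (k + 1) (k - 1) (by omega) (by omega)]
    simp [hk0]

theorem pvILS_step (level : List Int) (n : Int) (k : Nat) (hk : k < (n - 1).toNat) :
    (if pvSafe level k = true then PySem.List.pySetD (pvILS level n k) (k : Int) true
     else pvILS level n k) = pvILS level n (k + 1) := by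
  split_ifs with h
  · simp only [PySem.List.pySetD_natCast]
    apply List.ext_getElem
    · simp [pvILS]
    · intro j hj _
      simp only [pvILS, List.getElem_set, List.getElem_map, List.getElem_range] at *
      by_cases hjk : j = k
      · subst hjk; simp [h]
      · have e1 : decide (k = j) = false := decide_eq_false (by omega)
        have e2 : decide (j < k) = decide (j ≤ k) := decide_eq_decide.mpr (by omega)
        simp [e1, e2]
  · apply List.ext_getElem
    · simp [pvILS]
    · intro j hj _
      simp only [pvILS, List.getElem_map, List.getElem_range] at *
      by_cases hjk : j = k
      · subst hjk; simp [h]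
      · congr 1
        simp only [decide_eq_decide]; omega

theorem pvLoop_inv (level : List Int) (n : Int) (k : Nat) (hk : (k : Int) ≤ n - 1) :
    (PySem.List.pyRange 0 (k : Int) 1).foldl
      (fun (st : List Bool × List Bool) i =>
        let diff := PySem.List.pyGetD level i 0 - PySem.List.pyGetD level (i + 1) 0
        let ni := if 0 < diff then PySem.List.pySetD st.1 i true else st.1
        let ils := if (1 ≤ |diff| ∧ |diff| ≤ 3) ∧
                      (i = 0 ∨ PySem.List.pyGetD ni i false = PySem.List.pyGetD ni (i - 1) false)
                   then PySem.List.pySetD st.2 i true else st.2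
        (ni, ils))
      (pvNI level n 0, pvILS level n 0)
    = (pvNI level n k, pvILS level n k) := by
  induction k with
  | zero =>
    rw [PySem.List.pyRange_one_eq_nil (by omega)]; rfl
  | succ k ih =>
    have hk' : (k : Int) ≤ n - 1 := by omega
    have hkn : k < n.toNat := by omega
    have hkm : k < (n - 1).toNat := by omega
    rw [show ((k + 1 : Nat) : Int) = (k : Int) + 1 from by push_cast; ring,
        PySem.List.pyRange_one_succ_right (by omega), List.foldl_append, ih hk',
        List.foldl_cons, List.foldl_nil]
    dsimp only
    rw [show (PySem.List.pyGetD level (k : Int) 0 - PySem.List.pyGetD level ((k : Int) + 1) 0)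
          = pvDif level (k : Int) from rfl,
        pvNI_step level n k hkn,
        if_congr (pvCond_iff level n k hkn) rfl rfl,
        pvILS_step level n k hkm]

theorem pvLoop_inv' (level : List Int) (n : Int) (h : 0 ≤ n - 1) :
    (PySem.List.pyRange 0 (n - 1) 1).foldl
      (fun (st : List Bool × List Bool) i =>
        let diff := PySem.List.pyGetD level i 0 - PySem.List.pyGetD level (i + 1) 0
        let ni := if 0 < diff then PySem.List.pySetD st.1 i true else st.1
        let ils := if (1 ≤ |diff| ∧ |diff| ≤ 3) ∧
                      (i = 0 ∨ PySem.List.pyGetD ni i false = PySem.List.pyGetD ni (i - 1) false)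
                   then PySem.List.pySetD st.2 i true else st.2
        (ni, ils))
      (pvNI level n 0, pvILS level n 0)
    = (pvNI level n ((n - 1).toNat), pvILS level n ((n - 1).toNat)) := by
  have hinv := pvLoop_inv level n (n - 1).toNat (by omega)
  rwa [show (((n - 1).toNat : Nat) : Int) = n - 1 from by omega] at hinv

theorem pvA_iff (level : List Int) (n : Int) :
    evaulate_level level n = if (∀ j < (n - 1).toNat, pvSafe level j = true) then 1 else 0 := by
  unfold evaulate_level
  dsimp only
  by_cases hn : n - 1 ≤ 0
  · rw [PySem.List.pyRange_one_eq_nil hn]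
    have h0 : (n - 1).toNat = 0 := by omega
    simp only [List.foldl_nil, List.map_nil, List.all_nil, h0]
    simp
  · have hinit_ni : (PySem.List.pyRange 0 n 1).map (fun _ => (false : Bool)) = pvNI level n 0 := by
      rw [PySem.List.pyRange_one]; simp [pvNI]
    have hinit_ils : (PySem.List.pyRange 0 (n - 1) 1).map (fun _ => (false : Bool)) = pvILS level n 0 := by
      rw [PySem.List.pyRange_one]; simp [pvILS]
    rw [hinit_ni, hinit_ils, pvLoop_inv' level n (by omega)]
    refine if_congr ?_ rfl rfl
    simp only [pvILS, List.all_eq_true, List.mem_map, List.mem_range]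
    constructor
    · intro hall j hj
      have h := hall _ ⟨j, hj, rfl⟩
      simp only [Bool.and_eq_true, decide_eq_true_eq] at h
      exact h.2
    · rintro hall x ⟨j, hj, rfl⟩
      simp only [Bool.and_eq_true, decide_eq_true_eq]
      exact ⟨hj, hall j hj⟩

theorem pvDir_chain (level : List Int) (m : Nat) (hall : ∀ j < m, pvSafe level j = true) :
    ∀ j < m, (0 < pvDif level (j : Int) ↔ 0 < pvDif level 0) := by
  intro j
  induction j with
  | zero => intro _; simp
  | succ i ih =>
    intro h
    have hs := hall (i + 1) h
    unfold pvSafe at hs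
    simp only [Nat.succ_ne_zero, decide_false, Bool.false_or, Bool.and_eq_true,
      beq_iff_eq, decide_eq_decide, decide_eq_true_eq] at hs
    have hc : ((i + 1 : Nat) : Int) - 1 = (i : Int) := by push_cast; ring
    rw [hc] at hs
    exact (hs.2).trans (ih (by omega))

theorem pvLogic (level : List Int) (m : Nat) :
    (∀ j < m, pvSafe level j = true) ↔
      (∀ j < m, 1 ≤ pvDif level (j : Int) ∧ pvDif level (j : Int) ≤ 3) ∨
      (∀ j < m, -3 ≤ pvDif level (j : Int) ∧ pvDif level (j : Int) ≤ -1) := by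
  constructor
  · intro hall
    by_cases hd : 0 < pvDif level 0
    · left
      intro j hj
      have hs := hall j hj
      unfold pvSafe at hs
      simp only [Bool.and_eq_true, decide_eq_true_eq] at hs
      obtain ⟨⟨hb1, hb2⟩, -⟩ := hs
      have hdir := (pvDir_chain level m hall j hj).mpr hd
      rcases abs_cases (pvDif level (j : Int)) with ⟨he, hsg⟩ | ⟨he, hsg⟩ <;>
        rw [he] at hb1 hb2 <;> omega
    · right
      intro j hj
      have hs := hall j hj
      unfold pvSafe at hs
      simp only [Bool.and_eq_true, decide_eq_true_eq] at hs
      obtain ⟨⟨hb1, hb2⟩, -⟩ := hs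
      have hdir : ¬ 0 < pvDif level (j : Int) := fun hp => hd ((pvDir_chain level m hall j hj).mp hp)
      rcases abs_cases (pvDif level (j : Int)) with ⟨he, hsg⟩ | ⟨he, hsg⟩ <;>
        rw [he] at hb1 hb2 <;> omega
  · intro hdisj j hj
    unfold pvSafe
    simp only [Bool.and_eq_true, Bool.or_eq_true, beq_iff_eq, decide_eq_decide,
      decide_eq_true_eq]
    have h1 : (1 ≤ pvDif level (j : Int) ∧ pvDif level (j : Int) ≤ 3) ∨
        (-3 ≤ pvDif level (j : Int) ∧ pvDif level (j : Int) ≤ -1) := by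
      rcases hdisj with hall | hall
      · exact Or.inl (hall j hj)
      · exact Or.inr (hall j hj)
    refine ⟨?_, ?_⟩
    · rcases abs_cases (pvDif level (j : Int)) with ⟨he, hsg⟩ | ⟨he, hsg⟩ <;>
        rw [he] <;> omega
    · rcases Nat.eq_zero_or_pos j with h0 | h0
      · exact Or.inl (by simp [h0])
      · refine Or.inr ?_
        have hc : ((j : Int) - 1) = ((j - 1 : Nat) : Int) := by omega
        rw [hc]
        rcases hdisj with hall | hall
        · have ha := hall j hj
          have hb := hall (j - 1) (by omega)
          constructor <;> omega
        · have ha := hall j hj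
          have hb := hall (j - 1) (by omega)
          constructor <;> omega

theorem pvB_iff (level : List Int) (n : Int) :
    evaulate_level_alt level n =
      if (∀ j < (n - 1).toNat, 1 ≤ pvDif level j ∧ pvDif level j ≤ 3) ∨
         (∀ j < (n - 1).toNat, -3 ≤ pvDif level j ∧ pvDif level j ≤ -1) then 1 else 0 := by
  unfold evaulate_level_alt
  rw [PySem.List.pyRange_one]
  refine if_congr ?_ rfl rfl
  simp [pvDif, List.all_eq_true]

-- ===== VERDICT (by name: the statement is the Claim_ definition above) =====
theorem evaulate_level_spec : Claim_equal_evaulate_level := by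
  intro level n _ _
  unfold Spec_evaulate_level
  rw [pvA_iff, pvB_iff]
  by_cases h : ∀ j < (n - 1).toNat, pvSafe level j = true
  · rw [if_pos h, if_pos ((pvLogic level _).mp h)]
  · rw [if_neg h, if_neg (fun hc => h ((pvLogic level _).mpr hc))]
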